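-- pv_equiv track=rewrite | github.com/Hockey86/iic_causal_inference | aim1/step1c_generate_covariates_outcomes.py | convert_to_onehot
-- ===== SOURCE A (Python) =====
-- def convert_to_onehot(A, id2diag):
--     A_onehot = {x:[0]*len(A) for x in id2diag.values()}
--     for i, dd in enumerate(A):
--         if type(dd)==str:
--             dd = dd.replace('.', ',')
--             if ',' in dd:
--                 this_row_diags = [int(x) for x in dd.strip().split(',')]
--             else:
--                 this_row_diags = [int(x) for x in dd.strip().split(' ')]
--             for trd in this_row_diags:
--                 A_onehot[id2diag[trd]][i] = 1
--     return A_onehot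
-- ===== SOURCE B (Python) =====
-- def convert_to_onehot(A, id2diag):
--     # parse every row once into the set of category names it mentions,
--     # then build the result column-by-column by membership tests
--     names = list(dict.fromkeys(id2diag.values()))
--     parsed = []
--     for dd in A:
--         row = set()
--         if type(dd) == str:
--             t = dd.replace('.', ',')
--             toks = t.strip().split(',') if ',' in t else t.strip().split(' ')
--             for x in toks:
--                 row.add(id2diag[int(x)])
--         parsed.append(row)
--     return {name: [1 if name in row else 0 for row in parsed] for name in names}
-- ===== Notes on version B (the rewrite author's own statement) =====
-- stated objective: alternative
-- what changed: A pre-fills a dict of zero vectors and mutates them in place row-by-row; B parses each row once into a set of category names and then builds the result column-by-column with membership tests (inverted traversal, no mutation).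
import Mathlib
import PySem

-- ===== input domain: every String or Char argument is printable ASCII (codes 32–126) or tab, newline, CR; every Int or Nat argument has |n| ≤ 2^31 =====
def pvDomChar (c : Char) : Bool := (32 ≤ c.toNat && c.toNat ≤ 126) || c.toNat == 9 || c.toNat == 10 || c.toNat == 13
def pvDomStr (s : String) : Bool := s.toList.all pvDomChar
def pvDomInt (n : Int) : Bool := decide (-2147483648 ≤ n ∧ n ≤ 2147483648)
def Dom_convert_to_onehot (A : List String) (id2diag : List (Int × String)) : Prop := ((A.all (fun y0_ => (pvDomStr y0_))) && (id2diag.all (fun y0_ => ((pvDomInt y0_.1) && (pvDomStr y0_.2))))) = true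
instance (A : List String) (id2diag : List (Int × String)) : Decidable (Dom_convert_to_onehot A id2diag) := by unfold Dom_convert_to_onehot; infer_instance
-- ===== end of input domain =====

-- B replaces A's row-major in-place mutation of pre-zeroed vectors by a single parsing pass
-- into per-row name sets followed by a column-by-column membership build (alternative
-- decomposition, same asymptotic cost).

-- ===== PORT A =====
def convert_to_onehot (A : List String) (id2diag : List (Int × String)) : List (String × List Int) :=
  -- id2diag is a Python dict: modelled as PySem.Dict built from the association list
  let d := PySem.Dict.ofList id2diag
  -- A_onehot = {x: [0]*len(A) for x in id2diag.values()}
  let A_onehot : PySem.Dict String (List Int) :=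
    d.values.foldl (fun acc x => acc.insert x (List.replicate A.length (0 : Int))) PySem.Dict.empty
  -- for i, dd in enumerate(A):  ('type(dd)==str' always holds: every row is a string here)
  let final :=
    (PySem.List.enumerate A 0).foldl (fun acc p =>
      -- dd = dd.replace('.', ',')
      let t := (PySem.Str.replace p.2 "." ",").toList
      -- this_row_diags = [int(x) for x in dd.strip().split(',' or ' ')]
      let this_row_diags : List Int :=
        (if PySem.Chars.isIn [','] t
         then PySem.Chars.splitOn (PySem.Chars.strip t) [',']
         else PySem.Chars.splitOn (PySem.Chars.strip t) [' ']).map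
          (fun x => (PySem.Int.ofChars? x).getD 0)      -- int(x); ValueError excluded by Pre_
      -- A_onehot[id2diag[trd]][i] = 1   (KeyError excluded by Pre_)
      this_row_diags.foldl (fun acc trd =>
        acc.modify ((d.get? trd).getD "") [] (fun v => PySem.List.pySetD v p.1 1)) acc) A_onehot
  final.items

-- ===== PORT B =====
-- the set of category names mentioned by one row (same parsing as the Python helper loop in B)
def pvRowNames (d : PySem.Dict Int String) (dd : String) : PySem.Set String :=
  let t := (PySem.Str.replace dd "." ",").toList
  let toks :=
    if PySem.Chars.isIn [','] t
    then PySem.Chars.splitOn (PySem.Chars.strip t) [',']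
    else PySem.Chars.splitOn (PySem.Chars.strip t) [' ']
  toks.foldl (fun row x =>
    PySem.Set.add row ((d.get? ((PySem.Int.ofChars? x).getD 0)).getD "")) PySem.Set.empty

def convert_to_onehot_alt (A : List String) (id2diag : List (Int × String)) : List (String × List Int) :=
  let d := PySem.Dict.ofList id2diag
  -- names = list(dict.fromkeys(id2diag.values()))
  let names := PySem.List.dedup d.values
  -- parsed = [row names of dd for dd in A]
  let parsed := A.map (pvRowNames d)
  -- {name: [1 if name in row else 0 for row in parsed] for name in names}
  names.map (fun name =>
    (name, parsed.map (fun row => if PySem.Set.contains row name then (1 : Int) else 0)))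

-- ===== PRECONDITION & SPEC =====
-- the token list of one row, exactly as both Pythons tokenize it ('.'→',', comma-else-space split)
def pvToks (dd : String) : List (List Char) :=
  let t := (PySem.Str.replace dd "." ",").toList
  if PySem.Chars.isIn [','] t
  then PySem.Chars.splitOn (PySem.Chars.strip t) [',']
  else PySem.Chars.splitOn (PySem.Chars.strip t) [' ']

-- Pre_ excludes exactly the inputs where A raises: a token that is not a Python int literal
-- (ValueError) or an int that is not a key of id2diag (KeyError).
def Pre_convert_to_onehot (A : List String) (id2diag : List (Int × String)) : Prop :=
  ∀ dd ∈ A, ∀ x ∈ pvToks dd,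
    ((PySem.Int.ofChars? x).any fun n => (PySem.Dict.ofList id2diag).contains n) = true
instance (A : List String) (id2diag : List (Int × String)) : Decidable (Pre_convert_to_onehot A id2diag) := by unfold Pre_convert_to_onehot; infer_instance

def pvWitness_convert_to_onehot : List String × (List (Int × String)) :=
  (["1,2", "2 1", "1.1"], [((1 : Int), "a"), ((2 : Int), "b")])

def Spec_convert_to_onehot (A : List String) (id2diag : List (Int × String)) (out : List (String × List Int)) : Prop := out = convert_to_onehot_alt A id2diag
instance (A : List String) (id2diag : List (Int × String)) (out : List (String × List Int)) : Decidable (Spec_convert_to_onehot A id2diag out) := by unfold Spec_convert_to_onehot; infer_instance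

-- ===== CLAIM (what is proved, stated in full; the proofs are below) =====
def Claim_equal_convert_to_onehot : Prop := ∀ (A : List String) (id2diag : List (Int × String)), Dom_convert_to_onehot A id2diag → Pre_convert_to_onehot A id2diag → Spec_convert_to_onehot A id2diag (convert_to_onehot A id2diag)

-- ===== LEMMAS AND PROOFS =====

-- proof-side abbreviations for A's loop pieces
def pvLk (d : PySem.Dict Int String) (t : Int) : String := (d.get? t).getD ""
def pvTok2Name (d : PySem.Dict Int String) (x : List Char) : String :=
  pvLk d ((PySem.Int.ofChars? x).getD 0)
def pvC (d : PySem.Dict Int String) (n dd : String) : Bool :=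
  (pvToks dd).any (fun x => pvTok2Name d x == n)
def pvEff (d : PySem.Dict Int String) (n : String) (ps : List (Int × String)) (v : List Int) : List Int :=
  ps.foldl (fun v p => if pvC d n p.2 then PySem.List.pySetD v p.1 1 else v) v
def pvInit (A : List String) (id2diag : List (Int × String)) : PySem.Dict String (List Int) :=
  (PySem.Dict.ofList id2diag).values.foldl
    (fun acc x => acc.insert x (List.replicate A.length (0 : Int))) PySem.Dict.empty
def pvStepA (d : PySem.Dict Int String) (acc : PySem.Dict String (List Int)) (p : Int × String) :
    PySem.Dict String (List Int) :=
  let t := (PySem.Str.replace p.2 "." ",").toList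
  let this_row_diags : List Int :=
    (if PySem.Chars.isIn [','] t
     then PySem.Chars.splitOn (PySem.Chars.strip t) [',']
     else PySem.Chars.splitOn (PySem.Chars.strip t) [' ']).map
      (fun x => (PySem.Int.ofChars? x).getD 0)
  this_row_diags.foldl (fun acc trd =>
    acc.modify ((d.get? trd).getD "") [] (fun v => PySem.List.pySetD v p.1 1)) acc

lemma pv_portA_shape (A : List String) (id2diag : List (Int × String)) :
    convert_to_onehot A id2diag =
      ((PySem.List.enumerate A 0).foldl (pvStepA (PySem.Dict.ofList id2diag))
        (pvInit A id2diag)).items := rfl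

lemma pv_stepA_eq (d0 : PySem.Dict Int String) (acc : PySem.Dict String (List Int))
    (p : Int × String) :
    pvStepA d0 acc p
      = ((pvToks p.2).map (fun x => (PySem.Int.ofChars? x).getD 0)).foldl
          (fun acc trd => acc.modify (pvLk d0 trd) [] (fun v => PySem.List.pySetD v p.1 1)) acc := rfl

lemma pv_getD_foldl_insert_const {ν : Type} (z dflt : ν) (vs : List String) :
    ∀ (d : PySem.Dict String ν) (n : String),
      (vs.foldl (fun acc x => acc.insert x z) d).getD n dflt
        = if n ∈ vs then z else d.getD n dflt := by
  induction vs with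
  | nil => simp
  | cons x vs ih =>
    intro d n
    rw [List.foldl_cons, ih]
    by_cases h1 : n ∈ vs <;> by_cases h2 : n = x <;>
      simp [h1, h2, PySem.Dict.getD_insert]

lemma pv_init_keys (A : List String) (id2diag : List (Int × String)) :
    (pvInit A id2diag).keys = PySem.List.dedup (PySem.Dict.ofList id2diag).values := by
  unfold pvInit
  rw [PySem.Dict.keys_foldl_insert _ (fun _ _ => List.replicate A.length (0 : Int))]
  rw [PySem.List.dedup_eq_ofList, PySem.Set.ofList_eq_foldl]
  rfl

lemma pv_init_getD (A : List String) (id2diag : List (Int × String)) (n : String)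
    (h : n ∈ (PySem.Dict.ofList id2diag).values) :
    (pvInit A id2diag).getD n [] = List.replicate A.length (0 : Int) := by
  unfold pvInit
  rw [pv_getD_foldl_insert_const, if_pos h]

lemma pv_setD_idem (v : List Int) (i : Int) (hi : 0 ≤ i) :
    PySem.List.pySetD (PySem.List.pySetD v i 1) i 1 = PySem.List.pySetD v i 1 := by
  rw [PySem.List.pySetD_of_nonneg _ _ hi, PySem.List.pySetD_of_nonneg _ _ hi, List.set_set]

lemma pv_inner (d0 : PySem.Dict Int String) (i : Int) (hi : 0 ≤ i) (trds : List Int) :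
    ∀ (d : PySem.Dict String (List Int)), (∀ t ∈ trds, pvLk d0 t ∈ d.keys) →
      (trds.foldl (fun acc trd =>
          acc.modify (pvLk d0 trd) [] (fun v => PySem.List.pySetD v i 1)) d).keys = d.keys
      ∧ ∀ n : String,
        (trds.foldl (fun acc trd =>
            acc.modify (pvLk d0 trd) [] (fun v => PySem.List.pySetD v i 1)) d).getD n []
          = if trds.any (fun t => pvLk d0 t == n)
            then PySem.List.pySetD (d.getD n []) i 1 else d.getD n [] := by
  induction trds with
  | nil => intro d _; simp
  | cons t ts ih =>
    intro d hks
    have hmem : pvLk d0 t ∈ d.keys := hks t (by simp)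
    have hcont : d.contains (pvLk d0 t) = true := (PySem.Dict.contains_iff_mem_keys _ _).mpr hmem
    have hkeys_step :
        (d.modify (pvLk d0 t) [] (fun v => PySem.List.pySetD v i 1)).keys = d.keys := by
      rw [PySem.Dict.keys_modify, PySem.Dict.keys_insert_of_contains _ _ hcont]
    obtain ⟨ihk, ihg⟩ := ih (d.modify (pvLk d0 t) [] (fun v => PySem.List.pySetD v i 1))
      (fun t' ht' => by rw [hkeys_step]; exact hks t' (List.mem_cons_of_mem _ ht'))
    refine ⟨by rw [List.foldl_cons, ihk, hkeys_step], ?_⟩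
    intro n
    rw [List.foldl_cons, ihg n, List.any_cons]
    rw [PySem.Dict.getD_modify]
    by_cases h1 : pvLk d0 t = n
    · subst h1
      by_cases h2 : ts.any (fun t' => pvLk d0 t' == pvLk d0 t) = true <;>
        simp [h2, pv_setD_idem _ _ hi]
    · have h1' : ¬ (n = pvLk d0 t) := fun h => h1 h.symm
      by_cases h2 : ts.any (fun t' => pvLk d0 t' == n) = true <;>
        simp [h1, h1', h2, beq_iff_eq]

lemma pv_outer (d0 : PySem.Dict Int String) (nm : List String) (ps : List (Int × String)) :
    ∀ (d : PySem.Dict String (List Int)), d.keys = nm →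
      (∀ p ∈ ps, 0 ≤ p.1 ∧ ∀ x ∈ pvToks p.2, pvTok2Name d0 x ∈ nm) →
      (ps.foldl (pvStepA d0) d).keys = nm
      ∧ ∀ n : String, (ps.foldl (pvStepA d0) d).getD n [] = pvEff d0 n ps (d.getD n []) := by
  induction ps with
  | nil => intro d hd _; exact ⟨hd, fun n => rfl⟩
  | cons p ps ih =>
    intro d hd hps
    obtain ⟨hi, hrow⟩ := hps p (by simp)
    have hmem : ∀ t ∈ (pvToks p.2).map (fun x => (PySem.Int.ofChars? x).getD 0),
        pvLk d0 t ∈ d.keys := by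
      intro t ht
      obtain ⟨x, hx, rfl⟩ := List.mem_map.mp ht
      rw [hd]; exact hrow x hx
    obtain ⟨hik, hig⟩ := pv_inner d0 p.1 hi _ d hmem
    have hkstep : (pvStepA d0 d p).keys = nm := by rw [pv_stepA_eq, hik, hd]
    obtain ⟨ohk, ohg⟩ := ih (pvStepA d0 d p) hkstep
      (fun q hq => hps q (List.mem_cons_of_mem _ hq))
    refine ⟨by rw [List.foldl_cons]; exact ohk, ?_⟩
    intro n
    rw [List.foldl_cons, ohg n]
    have hc : ((pvToks p.2).map (fun x => (PySem.Int.ofChars? x).getD 0)).any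
        (fun t => pvLk d0 t == n) = pvC d0 n p.2 := by
      rw [List.any_map]; rfl
    have hg := hig n
    rw [pv_stepA_eq] at *
    rw [hg, hc]
    rfl

lemma pv_eff_spec (d0 : PySem.Dict Int String) (n : String) (rows : List String) :
    ∀ (pre : List Int),
      pvEff d0 n (PySem.List.enumerate rows (pre.length : Int))
          (pre ++ List.replicate rows.length (0 : Int))
        = pre ++ rows.map (fun dd => if pvC d0 n dd then (1 : Int) else 0) := by
  induction rows with
  | nil => intro pre; simp [pvEff]
  | cons dd rest ih =>
    intro pre
    rw [PySem.List.enumerate_cons]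
    have hstep : ∀ c : Int, (pre.length : Int) + 1 = (((pre ++ [c]).length : Nat) : Int) := by
      intro c; simp
    have hv : ∀ c : Int,
        pre ++ c :: List.replicate rest.length (0 : Int)
          = (pre ++ [c]) ++ List.replicate rest.length (0 : Int) := by
      intro c; simp
    have hset : PySem.List.pySetD (pre ++ (0 : Int) :: List.replicate rest.length 0)
        (pre.length : Int) 1 = pre ++ (1 : Int) :: List.replicate rest.length 0 := by
      rw [PySem.List.pySetD_natCast]
      rw [List.set_append_right _ _ (Nat.le_refl _)]
      simp
    simp only [List.length_cons, List.replicate_succ, pvEff, List.foldl_cons]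
    by_cases hc : pvC d0 n dd
    · rw [if_pos hc, hset, hv 1, hstep 1]
      have := ih (pre ++ [1])
      simp only [pvEff] at this
      rw [this]
      simp [hc]
    · rw [if_neg hc, hv 0, hstep 0]
      have := ih (pre ++ [0])
      simp only [pvEff] at this
      rw [this]
      simp [hc]

lemma pv_rowNames_eq (d0 : PySem.Dict Int String) (dd : String) :
    pvRowNames d0 dd = PySem.Set.ofList ((pvToks dd).map (pvTok2Name d0)) := by
  rw [PySem.Set.ofList_eq_foldl, List.foldl_map]
  rfl

lemma pv_contains_rowNames (d0 : PySem.Dict Int String) (dd n : String) :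
    PySem.Set.contains (pvRowNames d0 dd) n = pvC d0 n dd := by
  rw [pv_rowNames_eq]
  by_cases h : n ∈ (pvToks dd).map (pvTok2Name d0)
  · have h1 : PySem.Set.contains (PySem.Set.ofList ((pvToks dd).map (pvTok2Name d0))) n = true := by
      simpa [PySem.Set.contains, PySem.Set.mem_ofList] using h
    have h2 : pvC d0 n dd = true := by
      obtain ⟨x, hx, hfx⟩ := List.mem_map.mp h
      simp only [pvC, List.any_eq_true]
      exact ⟨x, hx, by simp [hfx]⟩
    rw [h1, h2]
  · have h1 : PySem.Set.contains (PySem.Set.ofList ((pvToks dd).map (pvTok2Name d0))) n = false := by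
      simpa [PySem.Set.contains, PySem.Set.mem_ofList] using h
    have h2 : pvC d0 n dd = false := by
      simp only [pvC, List.any_eq_false]
      intro x hx
      simp only [beq_iff_eq]
      intro hfx
      exact h (List.mem_map.mpr ⟨x, hx, hfx⟩)
    rw [h1, h2]

-- ===== VERDICT (by name: the statement is the Claim_ definition above) =====
set_option maxHeartbeats 1000000 in
theorem convert_to_onehot_spec : Claim_equal_convert_to_onehot := by
  intro A id2diag _ hpre
  unfold Spec_convert_to_onehot
  have hB : convert_to_onehot_alt A id2diag
      = (PySem.List.dedup (PySem.Dict.ofList id2diag).values).map (fun n =>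
          (n, (A.map (pvRowNames (PySem.Dict.ofList id2diag))).map
            (fun row => if PySem.Set.contains row n then (1 : Int) else 0))) := rfl
  have hps : ∀ p ∈ PySem.List.enumerate A 0, 0 ≤ p.1 ∧
      ∀ x ∈ pvToks p.2, pvTok2Name (PySem.Dict.ofList id2diag) x
        ∈ PySem.List.dedup (PySem.Dict.ofList id2diag).values := by
    intro p hp
    obtain ⟨k, hk, rfl⟩ := (PySem.List.mem_enumerate_iff A 0 p).mp hp
    refine ⟨by positivity, ?_⟩
    intro x hx
    have hx' := hpre A[k] (List.getElem_mem hk) x hx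
    cases hh : PySem.Int.ofChars? x with
    | none => rw [hh] at hx'; simp [Option.any] at hx'
    | some m =>
      rw [hh] at hx'
      simp only [Option.any] at hx'
      have hsome : ((PySem.Dict.ofList id2diag).get? m).isSome := by
        rw [← PySem.Dict.contains_eq_isSome_get?]; exact hx'
      obtain ⟨v, hv⟩ := Option.isSome_iff_exists.mp hsome
      have hname : pvTok2Name (PySem.Dict.ofList id2diag) x = v := by
        simp [pvTok2Name, pvLk, hh, hv]
      rw [hname, PySem.List.mem_dedup]
      have hit := PySem.Dict.mem_items_of_get?_eq_some _ hv
      simp only [PySem.Dict.values]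
      exact List.mem_map.mpr ⟨(m, v), hit, rfl⟩
  obtain ⟨hFk, hFg⟩ := pv_outer (PySem.Dict.ofList id2diag)
    (PySem.List.dedup (PySem.Dict.ofList id2diag).values)
    (PySem.List.enumerate A 0) (pvInit A id2diag) (pv_init_keys A id2diag) hps
  have hnd : ((PySem.List.enumerate A 0).foldl (pvStepA (PySem.Dict.ofList id2diag))
      (pvInit A id2diag)).keys.Nodup := by
    rw [hFk]; exact PySem.List.nodup_dedup _
  rw [pv_portA_shape, hB, PySem.Dict.items_eq_map_keys _ hnd [], hFk]
  apply List.map_congr_left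
  intro n hn
  have hcol : (pvInit A id2diag).getD n [] = List.replicate A.length (0 : Int) :=
    pv_init_getD A id2diag n ((PySem.List.mem_dedup _ _).mp hn)
  have heff := pv_eff_spec (PySem.Dict.ofList id2diag) n A []
  simp only [List.length_nil, Nat.cast_zero, List.nil_append] at heff
  rw [hFg n, hcol, heff, List.map_map]
  refine congrArg _ (List.map_congr_left ?_)
  intro dd _
  show (if pvC (PySem.Dict.ofList id2diag) n dd then (1 : Int) else 0)
      = (if PySem.Set.contains (pvRowNames (PySem.Dict.ofList id2diag) dd) n then (1 : Int) else 0)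
  rw [pv_contains_rowNames]
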